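-- pv_equiv track=rewrite | github.com/fatupopzz/lab-combinatoria | problema3.py | simular_codigo_original
-- ===== SOURCE A (Python) =====
-- def simular_codigo_original(n, m):
--     """
--     Simula el código original y guarda todas las tuplas generadas
--     """
--     k = 0
--     tuplas = []
--
--     for i1 in range(1, n+1):
--         for i2 in range(1, i1+1):
--             for i3 in range(1, i2+1):
--                 for i4 in range(1, i3+1):
--                     for i5 in range(1, i4+1):
--                         k = k + 1
--                         # Guardamos la tupla en el orden pedido: (i5, i4, i3, i2, i1)
--                         tuplas.append((i5, i4, i3, i2, i1))
--
--     return k, tuplas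
-- ===== SOURCE B (Python) =====
-- def simular_codigo_original(n, m):
--     # Build weakly-increasing chains by repeatedly prepending a new smallest
--     # element, instead of five hardcoded nested loops.  m is unused, as in A.
--     chains = [[i] for i in range(1, n + 1)]
--     for _ in range(4):
--         chains = [[j] + t for t in chains for j in range(1, t[0] + 1)]
--     tuplas = [tuple(t) for t in chains]
--     return len(tuplas), tuplas
-- ===== Notes on version B (the rewrite author's own statement) =====
-- stated objective: alternative
-- what changed: B builds the weakly-increasing 5-tuples by starting from single-element chains and applying one generic prepend-extension step four times (then counts with len), instead of A's five hardcoded nested loops with a running counter; emission order is identical.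
import Mathlib
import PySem

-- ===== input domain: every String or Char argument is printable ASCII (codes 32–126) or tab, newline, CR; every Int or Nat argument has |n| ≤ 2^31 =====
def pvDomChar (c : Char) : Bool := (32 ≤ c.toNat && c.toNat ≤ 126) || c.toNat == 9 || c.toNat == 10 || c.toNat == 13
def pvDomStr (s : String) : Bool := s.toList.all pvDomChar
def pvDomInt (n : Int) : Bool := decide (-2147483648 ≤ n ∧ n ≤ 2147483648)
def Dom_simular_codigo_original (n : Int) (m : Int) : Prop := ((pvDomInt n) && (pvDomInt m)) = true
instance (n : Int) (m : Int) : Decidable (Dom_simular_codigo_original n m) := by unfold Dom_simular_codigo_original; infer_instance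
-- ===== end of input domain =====

-- B replaces A's five hardcoded nested loops by iterated prepend-extension of partial
-- chains (same output value and order; alternative decomposition, not claimed faster).

-- ===== PORT A =====
def simular_codigo_original (n : Int) (m : Int) : Int × (List (Int × Int × Int × Int × Int)) :=
  (PySem.List.pyRange 1 (n+1) 1).foldl (fun s1 i1 =>
    (PySem.List.pyRange 1 (i1+1) 1).foldl (fun s2 i2 =>
      (PySem.List.pyRange 1 (i2+1) 1).foldl (fun s3 i3 =>
        (PySem.List.pyRange 1 (i3+1) 1).foldl (fun s4 i4 =>
          (PySem.List.pyRange 1 (i4+1) 1).foldl (fun s5 i5 =>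
            (s5.1 + 1, s5.2 ++ [(i5, i4, i3, i2, i1)])) s4) s3) s2) s1)
    ((0 : Int), ([] : List (Int × Int × Int × Int × Int)))

-- ===== PORT B =====
-- [[j] + t for t in chains for j in range(1, t[0] + 1)]
-- t[0] ported as t.headD 0: every chain in B is nonempty, so this is exact here.
def pvStep (chains : List (List Int)) : List (List Int) :=
  chains.flatMap (fun t => (PySem.List.pyRange 1 (t.headD 0 + 1) 1).map (fun j => j :: t))

-- tuple(t): chains at the end always have length 5; the catch-all is unreachable.
def pvToQuint (t : List Int) : Int × Int × Int × Int × Int :=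
  match t with
  | [a, b, c, d, e] => (a, b, c, d, e)
  | _ => (0, 0, 0, 0, 0)

def simular_codigo_original_alt (n : Int) (m : Int) : Int × (List (Int × Int × Int × Int × Int)) :=
  let chains0 := (PySem.List.pyRange 1 (n+1) 1).map (fun i => [i])
  let chains := pvStep (pvStep (pvStep (pvStep chains0)))
  let tuplas := chains.map pvToQuint
  ((tuplas.length : Int), tuplas)

-- ===== PRECONDITION & SPEC =====
def Spec_simular_codigo_original (n : Int) (m : Int) (out : Int × (List (Int × Int × Int × Int × Int))) : Prop := out = simular_codigo_original_alt n m
instance (n : Int) (m : Int) (out : Int × (List (Int × Int × Int × Int × Int))) : Decidable (Spec_simular_codigo_original n m out) := by unfold Spec_simular_codigo_original; infer_instance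

-- ===== CLAIM (what is proved, stated in full; the proofs are below) =====
def Claim_equal_simular_codigo_original : Prop := ∀ (n : Int) (m : Int), Dom_simular_codigo_original n m → Spec_simular_codigo_original n m (simular_codigo_original n m)

-- ===== LEMMAS AND PROOFS =====

-- A counting-and-appending fold whose body appends a block g i is append of the flatMap.
theorem pv_foldl_block {α : Type} (l : List Int) (f : (Int × List α) → Int → (Int × List α))
    (g : Int → List α)
    (h : ∀ s i, i ∈ l → f s i = (s.1 + ((g i).length : Int), s.2 ++ g i)) :
    ∀ s, l.foldl f s = (s.1 + ((l.flatMap g).length : Int), s.2 ++ l.flatMap g) := by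
  induction l with
  | nil => intro s; simp
  | cons a l ih =>
    intro s
    have ha := h s a (by simp)
    rw [List.foldl_cons, ha, ih (fun s i hi => h s i (by simp [hi]))]
    simp only [List.flatMap_cons, List.length_append, List.append_assoc]
    refine Prod.ext ?_ rfl
    push_cast
    ring

theorem pvStep_map (l : List Int) (f : Int → List Int) :
    pvStep (l.map f) = l.flatMap (fun i => pvStep [f i]) := by
  simp [pvStep, List.flatMap_map]

theorem pvStep_flatMap (l : List Int) (f : Int → List (List Int)) :
    pvStep (l.flatMap f) = l.flatMap (fun i => pvStep (f i)) := by
  simp [pvStep, List.flatMap_assoc]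

-- the emitted blocks, expressed through B's step function
def pvG4 (i4 i3 i2 i1 : Int) : List (Int × Int × Int × Int × Int) :=
  (pvStep [[i4, i3, i2, i1]]).map pvToQuint
def pvG3 (i3 i2 i1 : Int) : List (Int × Int × Int × Int × Int) :=
  (pvStep (pvStep [[i3, i2, i1]])).map pvToQuint
def pvG2 (i2 i1 : Int) : List (Int × Int × Int × Int × Int) :=
  (pvStep (pvStep (pvStep [[i2, i1]]))).map pvToQuint
def pvG1 (i1 : Int) : List (Int × Int × Int × Int × Int) :=
  (pvStep (pvStep (pvStep (pvStep [[i1]])))).map pvToQuint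

theorem pvL5 (i1 i2 i3 i4 : Int) (s : Int × List (Int × Int × Int × Int × Int)) :
    (PySem.List.pyRange 1 (i4+1) 1).foldl (fun s5 i5 =>
      (s5.1 + 1, s5.2 ++ [(i5, i4, i3, i2, i1)])) s
    = (s.1 + ((pvG4 i4 i3 i2 i1).length : Int), s.2 ++ pvG4 i4 i3 i2 i1) := by
  have := pv_foldl_block (PySem.List.pyRange 1 (i4+1) 1)
      (fun s5 i5 => (s5.1 + 1, s5.2 ++ [(i5, i4, i3, i2, i1)]))
      (fun i5 => [(i5, i4, i3, i2, i1)]) (fun s i _ => by simp) s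
  rw [this]
  have hb : (PySem.List.pyRange 1 (i4+1) 1).flatMap (fun i5 => [(i5, i4, i3, i2, i1)])
      = pvG4 i4 i3 i2 i1 := by
    have h1 : ∀ l : List Int, l.flatMap (fun i5 => [(i5, i4, i3, i2, i1)])
        = l.map (fun i5 => (i5, i4, i3, i2, i1)) := by
      intro l
      induction l with
      | nil => rfl
      | cons a l ih => rw [List.flatMap_cons, List.map_cons, ih]; rfl
    simp [pvG4, pvStep, h1 _, pvToQuint, Function.comp]
  rw [hb]

theorem pvL4 (i1 i2 i3 : Int) (s : Int × List (Int × Int × Int × Int × Int)) :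
    (PySem.List.pyRange 1 (i3+1) 1).foldl (fun s4 i4 =>
      (PySem.List.pyRange 1 (i4+1) 1).foldl (fun s5 i5 =>
        (s5.1 + 1, s5.2 ++ [(i5, i4, i3, i2, i1)])) s4) s
    = (s.1 + ((pvG3 i3 i2 i1).length : Int), s.2 ++ pvG3 i3 i2 i1) := by
  have := pv_foldl_block (PySem.List.pyRange 1 (i3+1) 1) _
      (fun i4 => pvG4 i4 i3 i2 i1) (fun s i _ => pvL5 i1 i2 i3 i s) s
  rw [this]
  have hb : (PySem.List.pyRange 1 (i3+1) 1).flatMap (fun i4 => pvG4 i4 i3 i2 i1)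
      = pvG3 i3 i2 i1 := by
    have h1 : pvStep [[i3, i2, i1]]
        = (PySem.List.pyRange 1 (i3+1) 1).map (fun i4 => [i4, i3, i2, i1]) := by
      simp [pvStep]
    simp [pvG3, pvG4, h1, pvStep_map, List.map_flatMap]
  rw [hb]

theorem pvL3 (i1 i2 : Int) (s : Int × List (Int × Int × Int × Int × Int)) :
    (PySem.List.pyRange 1 (i2+1) 1).foldl (fun s3 i3 =>
      (PySem.List.pyRange 1 (i3+1) 1).foldl (fun s4 i4 =>
        (PySem.List.pyRange 1 (i4+1) 1).foldl (fun s5 i5 =>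
          (s5.1 + 1, s5.2 ++ [(i5, i4, i3, i2, i1)])) s4) s3) s
    = (s.1 + ((pvG2 i2 i1).length : Int), s.2 ++ pvG2 i2 i1) := by
  have := pv_foldl_block (PySem.List.pyRange 1 (i2+1) 1) _
      (fun i3 => pvG3 i3 i2 i1) (fun s i _ => pvL4 i1 i2 i s) s
  rw [this]
  have hb : (PySem.List.pyRange 1 (i2+1) 1).flatMap (fun i3 => pvG3 i3 i2 i1)
      = pvG2 i2 i1 := by
    have h1 : pvStep [[i2, i1]]
        = (PySem.List.pyRange 1 (i2+1) 1).map (fun i3 => [i3, i2, i1]) := by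
      simp [pvStep]
    simp [pvG2, pvG3, h1, pvStep_map, pvStep_flatMap, List.map_flatMap]
  rw [hb]

theorem pvL2 (i1 : Int) (s : Int × List (Int × Int × Int × Int × Int)) :
    (PySem.List.pyRange 1 (i1+1) 1).foldl (fun s2 i2 =>
      (PySem.List.pyRange 1 (i2+1) 1).foldl (fun s3 i3 =>
        (PySem.List.pyRange 1 (i3+1) 1).foldl (fun s4 i4 =>
          (PySem.List.pyRange 1 (i4+1) 1).foldl (fun s5 i5 =>
            (s5.1 + 1, s5.2 ++ [(i5, i4, i3, i2, i1)])) s4) s3) s2) s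
    = (s.1 + ((pvG1 i1).length : Int), s.2 ++ pvG1 i1) := by
  have := pv_foldl_block (PySem.List.pyRange 1 (i1+1) 1) _
      (fun i2 => pvG2 i2 i1) (fun s i _ => pvL3 i1 i s) s
  rw [this]
  have hb : (PySem.List.pyRange 1 (i1+1) 1).flatMap (fun i2 => pvG2 i2 i1)
      = pvG1 i1 := by
    have h1 : pvStep [[i1]]
        = (PySem.List.pyRange 1 (i1+1) 1).map (fun i2 => [i2, i1]) := by
      simp [pvStep]
    simp [pvG1, pvG2, h1, pvStep_map, pvStep_flatMap, List.map_flatMap]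
  rw [hb]

-- ===== VERDICT (by name: the statement is the Claim_ definition above) =====
theorem simular_codigo_original_spec : Claim_equal_simular_codigo_original := by
  intro n m _
  unfold Spec_simular_codigo_original simular_codigo_original simular_codigo_original_alt
  have hA := pv_foldl_block (PySem.List.pyRange 1 (n+1) 1) _
      (fun i1 => pvG1 i1) (fun s i _ => pvL2 i s)
      ((0 : Int), ([] : List (Int × Int × Int × Int × Int)))
  rw [hA]
  have hB : pvStep (pvStep (pvStep (pvStep ((PySem.List.pyRange 1 (n+1) 1).map (fun i => [i])))))
      = (PySem.List.pyRange 1 (n+1) 1).flatMap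
          (fun i1 => pvStep (pvStep (pvStep (pvStep [[i1]])))) := by
    rw [pvStep_map]
    rw [pvStep_flatMap, pvStep_flatMap, pvStep_flatMap]
  simp [hB, List.map_flatMap, pvG1]
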